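-- pv_equiv track=rewrite | github.com/Abjad/abjad | abjad/tools/segmenttools/Tags.py | get_document_tag
-- ===== SOURCE A (Python) =====
-- def get_document_tag(string: str) -> str:
--     r'''Gets document tag in ``string``.
--
--     ..  container:: example
--
--         >>> abjad.tags.get_document_tag('') is None
--         True
--
--         >>> abjad.tags.get_document_tag('FOO') is None
--         True
--
--         >>> abjad.tags.get_document_tag('+SEGMENT')
--         '+SEGMENT'
--
--         >>> abjad.tags.get_document_tag('+SEGMENT:FOO')
--         '+SEGMENT'
--
--     '''
--     if not isinstance(string, str):
--         return None
--     words = string.split(':')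
--     for word in words:
--         if word.startswith('+'):
--             return word
--     return None
-- ===== SOURCE B (Python) =====
-- def get_document_tag(string):
--     if not isinstance(string, str):
--         return None
--     at_start = True
--     for i, c in enumerate(string):
--         if at_start and c == '+':
--             end = string.find(':', i)
--             return string[i:] if end == -1 else string[i:end]
--         at_start = (c == ':')
--     return None
-- ===== Notes on version B (the rewrite author's own statement) =====
-- stated objective: alternative
-- what changed: Instead of building the full list of ':'-segments and scanning it, B makes a single character pass tracking segment starts with a flag and slices out the answer at the first '+' segment start.
import Mathlib
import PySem

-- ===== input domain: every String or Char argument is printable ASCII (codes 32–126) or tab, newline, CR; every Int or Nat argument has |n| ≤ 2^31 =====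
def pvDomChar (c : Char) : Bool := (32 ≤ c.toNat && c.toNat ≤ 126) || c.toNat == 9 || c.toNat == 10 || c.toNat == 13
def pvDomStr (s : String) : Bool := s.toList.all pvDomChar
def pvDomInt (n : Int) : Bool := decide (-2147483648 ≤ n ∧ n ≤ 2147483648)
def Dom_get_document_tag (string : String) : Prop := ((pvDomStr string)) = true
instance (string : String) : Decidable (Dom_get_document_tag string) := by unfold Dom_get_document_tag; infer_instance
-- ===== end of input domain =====

-- B replaces A's split-into-segments-then-scan by one character pass with a
-- segment-start flag (alternative decomposition, same asymptotic cost).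

-- ===== PORT A =====
-- the for-loop over the split words: first word starting with '+'
def pvFirstPlus : List String → Option String
  | [] => none
  | w :: ws => if PySem.Str.startswith w "+" then some w else pvFirstPlus ws

def get_document_tag (string : String) : Option String :=
  match PySem.Str.split? string ":" with
  | none => none   -- unreachable: separator ":" is nonempty
  | some words => pvFirstPlus words

-- ===== PORT B =====
-- the for-loop of Source B: atStart tracks segment boundaries; at the first '+' at a
-- segment start, return the rest of that segment (the slice up to the next ':')
def pvScan : Bool → List Char → Option (List Char)
  | _, [] => none
  | atStart, c :: rest =>
    if atStart && c == '+' then some ((c :: rest).takeWhile (fun d => d != ':'))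
    else pvScan (c == ':') rest

def get_document_tag_alt (string : String) : Option String :=
  (pvScan true string.toList).map String.ofList

-- ===== PRECONDITION & SPEC =====
def Spec_get_document_tag (string : String) (out : Option String) : Prop := out = get_document_tag_alt string
instance (string : String) (out : Option String) : Decidable (Spec_get_document_tag string out) := by unfold Spec_get_document_tag; infer_instance

-- ===== CLAIM (what is proved, stated in full; the proofs are below) =====
def Claim_equal_get_document_tag : Prop := ∀ (string : String), Dom_get_document_tag string → Spec_get_document_tag string (get_document_tag string)

-- ===== LEMMAS AND PROOFS =====

-- the segments of a ':'-split, with the reversed current segment as accumulator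
def pvSegs : List Char → List Char → List (List Char)
  | [], cur => [cur.reverse]
  | c :: rest, cur => if c = ':' then cur.reverse :: pvSegs rest [] else pvSegs rest (c :: cur)

-- the A-side scan, over lists of chars
def pvFirstPlusL : List (List Char) → Option (List Char)
  | [] => none
  | w :: ws => if PySem.Chars.startswith w ['+'] then some w else pvFirstPlusL ws

theorem pv_splitOn_go (l : List Char) : ∀ (fuel : Nat) (cur : List Char) (acc : List (List Char)),
    l.length ≤ fuel →
    PySem.Chars.splitOn.go [':'] fuel l cur acc = acc.reverse ++ pvSegs l cur := by
  induction l with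
  | nil =>
    intro fuel cur acc _
    cases fuel <;> simp [PySem.Chars.splitOn.go, pvSegs]
  | cons c rest ih =>
    intro fuel cur acc hle
    cases fuel with
    | zero => simp at hle
    | succ f =>
      by_cases hc : c = ':'
      · subst hc
        have h1 : List.isPrefixOf [':'] (':' :: rest) = true := by
          simp [List.isPrefixOf]
        simp only [PySem.Chars.splitOn.go, h1, if_pos]
        simp only [List.length_cons, List.length_nil, List.drop_succ_cons, List.drop_zero]
        rw [ih f [] (cur.reverse :: acc) (by simpa using Nat.le_of_succ_le_succ hle)]
        simp [pvSegs]
      · have h1 : List.isPrefixOf [':'] (c :: rest) = false := by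
          simp [List.isPrefixOf]; intro h; exact absurd h.symm hc
        simp only [PySem.Chars.splitOn.go, h1, Bool.false_eq_true, if_neg, not_false_iff]
        rw [ih f (c :: cur) acc (by simpa using Nat.le_of_succ_le_succ hle)]
        simp [pvSegs, hc]

theorem pv_startswith_plus_false (cur : List Char) (h : cur.reverse.head? ≠ some '+') :
    PySem.Chars.startswith cur.reverse ['+'] = false := by
  cases hrev : cur.reverse with
  | nil => simp [PySem.Chars.startswith, List.isPrefixOf]
  | cons a t =>
    rw [hrev] at h
    simp only [List.head?_cons] at h
    simp [PySem.Chars.startswith, List.isPrefixOf]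
    intro ha; exact absurd (by rw [ha]) h

theorem pv_plusSeg (cs : List Char) : ∀ (cur : List Char) (p : List Char),
    cur.reverse = '+' :: p →
    pvFirstPlusL (pvSegs cs cur) = some (cur.reverse ++ cs.takeWhile (fun d => d != ':')) := by
  induction cs with
  | nil =>
    intro cur p hrev
    simp [pvSegs, pvFirstPlusL, hrev, PySem.Chars.startswith, List.isPrefixOf]
  | cons c rest ih =>
    intro cur p hrev
    by_cases hc : c = ':'
    · subst hc
      simp [pvSegs, pvFirstPlusL, hrev, PySem.Chars.startswith, List.isPrefixOf,
        List.takeWhile]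
    · have hrev' : (c :: cur).reverse = '+' :: (p ++ [c]) := by
        simp [hrev]
      rw [pvSegs, if_neg hc, ih (c :: cur) (p ++ [c]) hrev']
      rw [hrev', hrev]
      have hcb : (c != ':') = true := by simpa using hc
      simp [List.takeWhile, hcb]

theorem pv_main (cs : List Char) : ∀ (cur : List Char),
    cur.reverse.head? ≠ some '+' →
    pvFirstPlusL (pvSegs cs cur) = pvScan cur.isEmpty cs := by
  induction cs with
  | nil =>
    intro cur h
    simp [pvSegs, pvFirstPlusL, pv_startswith_plus_false cur h, pvScan]
  | cons c rest ih =>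
    intro cur h
    by_cases hc : c = ':'
    · subst hc
      rw [pvSegs, if_pos rfl]
      rw [pvFirstPlusL, pv_startswith_plus_false cur h]
      simp only [Bool.false_eq_true, if_neg, not_false_iff]
      rw [ih [] (by simp)]
      cases cur <;> simp [pvScan]
    · by_cases hplus : cur = [] ∧ c = '+'
      · obtain ⟨hcur, hcp⟩ := hplus
        subst hcur; subst hcp
        rw [pvSegs, if_neg hc]
        rw [pv_plusSeg rest ['+'] [] (by simp)]
        simp [pvScan, List.takeWhile]
      · rw [pvSegs, if_neg hc]
        have hhead : (c :: cur).reverse.head? ≠ some '+' := by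
          cases hcur : cur with
          | nil =>
            simp only [List.reverse_cons, List.reverse_nil, List.nil_append,
              List.head?_cons, ne_eq, Option.some.injEq]
            intro hce
            exact hplus ⟨hcur, hce⟩
          | cons a t =>
            rw [← hcur]
            have hne : cur.reverse ≠ [] := by simp [hcur]
            simp only [List.reverse_cons]
            rw [List.head?_append_of_ne_nil _ hne]
            exact h
        rw [ih (c :: cur) hhead]
        have hguard : (cur.isEmpty && (c == '+')) = false := by
          cases hcur : cur with
          | nil =>
            simp only [List.isEmpty_nil, Bool.true_and, beq_eq_false_iff_ne, ne_eq]
            intro hce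
            exact hplus ⟨hcur, hce⟩
          | cons a t => simp
        rw [pvScan, hguard]
        simp only [Bool.false_eq_true, if_neg, not_false_iff, List.isEmpty_cons]
        have : (c == ':') = false := by simpa using hc
        rw [this]

theorem pv_firstPlus_map (ls : List (List Char)) :
    pvFirstPlus (ls.map String.ofList) = (pvFirstPlusL ls).map String.ofList := by
  induction ls with
  | nil => simp [pvFirstPlus, pvFirstPlusL]
  | cons w ws ih =>
    simp only [List.map_cons, pvFirstPlus, pvFirstPlusL]
    rw [PySem.Str.startswith_eq]
    have h1 : (String.ofList w).toList = w := by simp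
    have h2 : ("+" : String).toList = ['+'] := rfl
    rw [h1, h2]
    by_cases hs : PySem.Chars.startswith w ['+'] = true
    · simp [hs]
    · simp only [Bool.not_eq_true] at hs
      simp [hs, ih]

-- ===== VERDICT (by name: the statement is the Claim_ definition above) =====
theorem get_document_tag_spec : Claim_equal_get_document_tag := by
  intro s _
  unfold Spec_get_document_tag get_document_tag get_document_tag_alt
  rw [show PySem.Str.split? s ":" =
      some ((PySem.Chars.splitOn s.toList [':']).map String.ofList) by
    simp [PySem.Str.split?, PySem.Chars.split?]]
  show pvFirstPlus ((PySem.Chars.splitOn s.toList [':']).map String.ofList) =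
    Option.map String.ofList (pvScan true s.toList)
  rw [pv_firstPlus_map]
  rw [show PySem.Chars.splitOn s.toList [':'] = pvSegs s.toList [] by
    rw [PySem.Chars.splitOn]
    rw [pv_splitOn_go s.toList (s.toList.length + 1) [] [] (by omega)]
    simp]
  rw [pv_main s.toList [] (by simp)]
  rfl
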